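-- pv_equiv track=rewrite | github.com/vukrosic/ml-from-scratch | transformer-from-scratch/003-tokenization/tokenizers.py | char_tokenize
-- ===== SOURCE A (Python) =====
-- SPACE_CHAR = " "
--
-- def char_tokenize(text):
--     """Split text into individual characters with word-boundary spaces tracked."""
--     # We replace the normal space " " between words with a special SPACE_CHAR.
--     # This lets us recover word boundaries during decoding.
--     chars = []
--     words = text.split(" ")
--     for i, word in enumerate(words):
--         if i > 0:
--             chars.append(SPACE_CHAR)   # word boundary marker
--         for ch in word:
--             chars.append(ch)
--     return chars
-- ===== SOURCE B (Python) =====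
-- SPACE_CHAR = " "
--
-- def char_tokenize(text):
--     """Since SPACE_CHAR is a literal space, splitting on spaces and re-inserting
--     the marker reconstructs the original character sequence, so each character
--     of text is simply its own token."""
--     return [ch for ch in text]
-- ===== Notes on version B (the rewrite author's own statement) =====
-- stated objective: simpler
-- what changed: Since the word-boundary marker equals the split separator, the split-then-reinsert loop is the identity on characters; B is a single flat pass listing each character instead of splitting on spaces and looping over each word with a boundary special case.
import Mathlib
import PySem

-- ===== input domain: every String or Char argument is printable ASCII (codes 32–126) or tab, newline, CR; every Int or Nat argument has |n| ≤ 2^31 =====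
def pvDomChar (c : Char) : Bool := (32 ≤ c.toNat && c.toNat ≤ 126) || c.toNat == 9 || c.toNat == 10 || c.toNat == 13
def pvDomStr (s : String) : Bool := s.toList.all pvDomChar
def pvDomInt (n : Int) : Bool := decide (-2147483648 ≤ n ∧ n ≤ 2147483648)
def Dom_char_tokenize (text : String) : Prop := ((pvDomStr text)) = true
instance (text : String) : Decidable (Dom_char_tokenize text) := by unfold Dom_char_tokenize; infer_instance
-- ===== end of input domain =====

-- B replaces A's split-on-space + per-word loops (whose boundary marker equals the
-- separator) by one flat pass listing each character; objective: simpler.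

-- ===== PORT A =====
def char_tokenize (text : String) : List String :=
  let words := (PySem.Str.split? text " ").getD []
  (PySem.List.enumerate words 0).foldl
    (fun chars iw =>
      let chars := if iw.1 > 0 then chars ++ [" "] else chars
      iw.2.toList.foldl (fun cs ch => cs ++ [ch.toString]) chars) []

-- ===== PORT B =====
def char_tokenize_alt (text : String) : List String :=
  text.toList.map (fun ch => ch.toString)

-- ===== PRECONDITION & SPEC =====
def Spec_char_tokenize (text : String) (out : List String) : Prop := out = char_tokenize_alt text
instance (text : String) (out : List String) : Decidable (Spec_char_tokenize text out) := by unfold Spec_char_tokenize; infer_instance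

-- ===== CLAIM (what is proved, stated in full; the proofs are below) =====
def Claim_equal_char_tokenize : Prop := ∀ (text : String), Dom_char_tokenize text → Spec_char_tokenize text (char_tokenize text)

-- ===== LEMMAS AND PROOFS =====

-- proof-only helper: splitting on spaces with the first piece started at `pre`
def pvSplitSp (pre : List Char) : List Char → List (List Char)
  | [] => [pre]
  | c :: rest => if c = ' ' then pre :: pvSplitSp [] rest else pvSplitSp (pre ++ [c]) rest

theorem pvSplitSp_ne_nil (pre l : List Char) : pvSplitSp pre l ≠ [] := by
  induction l generalizing pre with
  | nil => simp [pvSplitSp]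
  | cons c rest ih => simp only [pvSplitSp]; split_ifs <;> simp [ih]

theorem pvGoEq (fuel : Nat) (l cur : List Char) (acc : List (List Char))
    (h : l.length < fuel) :
    PySem.Chars.splitOn.go [' '] fuel l cur acc = acc.reverse ++ pvSplitSp cur.reverse l := by
  induction fuel generalizing l cur acc with
  | zero => omega
  | succ fuel ih =>
    rw [PySem.Chars.splitOn.go.eq_def]
    cases l with
    | nil => simp [pvSplitSp]
    | cons c rest =>
      by_cases hc : c = ' '
      · subst hc
        simp only [List.isPrefixOf, List.length_cons, List.drop_succ_cons,
          beq_self_eq_true, Bool.true_and]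
        rw [if_pos (by simp)]
        simp only [List.length_nil, List.drop_zero]
        rw [ih rest [] (cur.reverse :: acc) (by simp at h; omega)]
        simp [pvSplitSp]
      · simp only [List.isPrefixOf, Bool.and_eq_true, beq_iff_eq]
        rw [if_neg (by intro h'; exact absurd h'.1.symm hc)]
        rw [ih rest (c :: cur) acc (by simp at h; omega)]
        simp [pvSplitSp, hc]

theorem pvSplitOn_space (cs : List Char) :
    PySem.Chars.splitOn cs [' '] = pvSplitSp [] cs := by
  unfold PySem.Chars.splitOn
  rw [pvGoEq _ _ _ _ (by omega)]
  simp

def pvTokW (w : List Char) : List String := w.map Char.toString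

theorem pvFlat (l : List Char) :
    (List.map (fun c => [String.singleton c]) l).flatten = List.map Char.toString l := by
  induction l with
  | nil => rfl
  | cons c r ih => simp [ih]

-- the token list A builds from a word list
def pvF : List (List Char) → List String
  | [] => []
  | w :: ws => pvTokW w ++ ws.flatMap (fun w => " " :: pvTokW w)

theorem pvF_cons_ne (w : List Char) (q : List (List Char)) (hq : q ≠ []) :
    pvF (w :: q) = pvTokW w ++ " " :: pvF q := by
  cases q with
  | nil => exact absurd rfl hq
  | cons t ts => simp [pvF]

theorem pvF_splitSp (l pre : List Char) :
    pvF (pvSplitSp pre l) = pvTokW pre ++ pvTokW l := by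
  induction l generalizing pre with
  | nil => simp [pvSplitSp, pvF, pvTokW]
  | cons c rest ih =>
    by_cases hc : c = ' '
    · subst hc
      rw [show pvSplitSp pre (' ' :: rest) = pre :: pvSplitSp [] rest by simp [pvSplitSp]]
      rw [pvF_cons_ne _ _ (pvSplitSp_ne_nil _ _), ih []]
      simp [pvTokW]
      rfl
    · rw [show pvSplitSp pre (c :: rest) = pvSplitSp (pre ++ [c]) rest by simp [pvSplitSp, hc]]
      rw [ih]
      simp [pvTokW]

theorem pvInnerFold (w : List Char) (cs : List String) :
    w.foldl (fun cs ch => cs ++ [ch.toString]) cs = cs ++ pvTokW w := by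
  induction w generalizing cs with
  | nil => simp [pvTokW]
  | cons c rest ih => simp [pvTokW, pvFlat]

theorem pvEnumFold (ws : List String) (n : Int) (hn : 0 < n) (acc : List String) :
    (PySem.List.enumerate ws n).foldl
      (fun chars iw =>
        let chars := if iw.1 > 0 then chars ++ [" "] else chars
        iw.2.toList.foldl (fun cs ch => cs ++ [ch.toString]) chars) acc
    = acc ++ ws.flatMap (fun w => " " :: pvTokW w.toList) := by
  induction ws generalizing n acc with
  | nil => simp [PySem.List.enumerate_nil]
  | cons w ws ih =>
    rw [PySem.List.enumerate_cons, List.foldl_cons]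
    simp only [gt_iff_lt, hn, if_pos]
    rw [ih (n + 1) (by omega)]
    simp [pvTokW, pvFlat]

theorem pvMain (text : String) : char_tokenize text = char_tokenize_alt text := by
  unfold char_tokenize char_tokenize_alt
  simp only [PySem.Str.split?, PySem.Chars.split?]
  rw [show " ".toList = [' '] from rfl]
  simp only [List.isEmpty_cons, Bool.false_eq_true, if_false, Option.map_some, Option.getD_some]
  rw [pvSplitOn_space]
  obtain ⟨w, q, hq⟩ : ∃ w q, pvSplitSp ([] : List Char) text.toList = w :: q := by
    cases h : pvSplitSp ([] : List Char) text.toList with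
    | nil => exact absurd h (pvSplitSp_ne_nil _ _)
    | cons a b => exact ⟨a, b, rfl⟩
  rw [hq, List.map_cons, PySem.List.enumerate_cons, List.foldl_cons]
  simp only [gt_iff_lt, lt_irrefl, if_false]
  rw [pvEnumFold _ _ (by omega)]
  rw [pvInnerFold]
  have hF : pvF (w :: q) = pvTokW text.toList := by
    rw [← hq, pvF_splitSp]; simp [pvTokW]
  simp only [pvF, pvTokW] at hF ⊢
  simpa [List.flatMap_map] using hF

-- ===== VERDICT (by name: the statement is the Claim_ definition above) =====
theorem char_tokenize_spec : Claim_equal_char_tokenize := by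
  intro text _
  unfold Spec_char_tokenize
  exact pvMain text
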